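-- pv_equiv track=rewrite | github.com/blinduandi/AA_Lab | Lab 2/visualization.py | heap_sort_opt_gen
-- ===== SOURCE A (Python) =====
-- def heap_sort_opt_gen(array):
--     def heapify(arr, n, i):
--         while True:
--             l = 2*i + 1
--             r = 2*i + 2
--             if l < n:
--                 yield (arr.copy(), [i, l])
--             if r < n:
--                 yield (arr.copy(), [i, r])
--             largest = i
--             if l < n and arr[l] > arr[largest]:
--                 largest = l
--             if r < n and arr[r] > arr[largest]:
--                 largest = r
--             if largest != i:
--                 arr[i], arr[largest] = arr[largest], arr[i]
--                 yield (arr.copy(), [i, largest])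
--                 i = largest
--             else:
--                 break
--     n = len(array)
--     for i in range(n//2-1, -1, -1):
--         yield from heapify(array, n, i)
--     for i in range(n-1, 0, -1):
--         array[0], array[i] = array[i], array[0]
--         yield (array.copy(), [0, i])
--         yield from heapify(array, i, 0)
-- ===== SOURCE B (Python) =====
-- def heap_sort_opt_gen(array):
--     # Note: A sorts `array` in place; B leaves the caller's list untouched
--     # (equivalence is about the yielded frames).
--     def sift(arr, n, i):
--         # Pure: return (frames, sifted copy of arr); recursion replaces A's while-loop.
--         l, r = 2 * i + 1, 2 * i + 2
--         frames = [(list(arr), [i, j]) for j in (l, r) if j < n]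
--         largest = max((j for j in (i, l, r) if j < n), key=lambda j: arr[j])
--         if largest == i:
--             return frames, arr
--         b = list(arr)
--         b[i], b[largest] = b[largest], b[i]
--         tail, final = sift(b, n, largest)
--         return frames + [(list(b), [i, largest])] + tail, final
--
--     a = list(array)
--     n = len(a)
--     for i in range(n // 2 - 1, -1, -1):
--         frames, a = sift(a, n, i)
--         yield from frames
--     for i in range(n - 1, 0, -1):
--         a[0], a[i] = a[i], a[0]
--         yield (list(a), [0, i])
--         frames, a = sift(a, i, 0)
--         yield from frames
-- ===== Notes on version B (the rewrite author's own statement) =====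
-- stated objective: alternative
-- what changed: A's in-place iterative `while True` heapify generator is replaced by a pure recursive sift that returns (frames, new array) without mutating, picks the largest child via `max` with a key over the filtered candidate indices, and builds probe frames with a comprehension; the two outer phase loops are kept.
import Mathlib
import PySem

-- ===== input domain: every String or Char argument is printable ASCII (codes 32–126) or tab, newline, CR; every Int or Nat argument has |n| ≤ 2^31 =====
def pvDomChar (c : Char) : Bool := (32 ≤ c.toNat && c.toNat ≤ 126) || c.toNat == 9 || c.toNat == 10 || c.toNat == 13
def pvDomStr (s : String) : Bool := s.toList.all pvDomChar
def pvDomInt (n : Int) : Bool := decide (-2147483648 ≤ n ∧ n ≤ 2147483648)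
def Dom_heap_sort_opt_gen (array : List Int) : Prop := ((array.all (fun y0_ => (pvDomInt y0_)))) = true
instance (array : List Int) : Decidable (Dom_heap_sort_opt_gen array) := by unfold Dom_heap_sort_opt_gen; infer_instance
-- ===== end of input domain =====

-- B replaces A's in-place iterative `while True` heapify by a pure recursive sift
-- (argmax via `max` with a key); A mutates its argument in place, B does not —
-- the equivalence proved here is about the returned frame sequence only.

-- ===== PORT A =====
-- A's inner `while True` generator, as a tail recursion over the loop state
-- (arr, i, frames-so-far).  Indices are Nats (Python's are nonnegative here);
-- arr.getD j 0 = arr[j], exact since every access is in range (j < n ≤ len arr).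
def heapifyA (arr : List Int) (n i : Nat) (acc : List (List Int × List Int)) :
    List (List Int × List Int) × List Int :=
  let l := 2*i + 1
  let r := 2*i + 2
  let acc1 := if l < n then acc ++ [(arr, [(i:Int), (l:Int)])] else acc
  let acc2 := if r < n then acc1 ++ [(arr, [(i:Int), (r:Int)])] else acc1
  let lg1 := if l < n ∧ arr.getD l 0 > arr.getD i 0 then l else i
  let lg := if r < n ∧ arr.getD r 0 > arr.getD lg1 0 then r else lg1
  if _h : lg ≠ i then
    -- arr[i], arr[largest] = arr[largest], arr[i]
    let arr' := (arr.set i (arr.getD lg 0)).set lg (arr.getD i 0)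
    heapifyA arr' n lg (acc2 ++ [(arr', [(i:Int), (lg:Int)])])
  else (acc2, arr)
termination_by n - i
decreasing_by
  simp only [lg, lg1] at _h ⊢
  split_ifs at _h ⊢ <;> omega

-- the two `for` loops of A, each a fold threading (frames, array)
def heap_sort_opt_gen (array : List Int) : List (List Int × List Int) :=
  let n := array.length
  -- for i in range(n//2-1, -1, -1): yield from heapify(array, n, i)
  let st1 := (List.range (n/2)).reverse.foldl
      (fun (st : List (List Int × List Int) × List Int) i => heapifyA st.2 n i st.1)
      ([], array)
  -- for i in range(n-1, 0, -1): swap, frame, yield from heapify(array, i, 0)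
  let st2 := ((List.range (n-1)).reverse.map (· + 1)).foldl
      (fun (st : List (List Int × List Int) × List Int) i =>
        let a := st.2
        let a' := (a.set 0 (a.getD i 0)).set i (a.getD 0 0)
        heapifyA a' i 0 (st.1 ++ [(a', [(0:Int), (i:Int)])]))
      st1
  st2.1

-- ===== PORT B =====
-- B's pure recursive sift: frames by a filtered comprehension, largest by
-- `max(..., key=lambda j: arr[j])` (= PySem.List.max?, first extremal element);
-- `.getD i` only totalises the empty-candidate case, which no call reaches (i < n).
def siftB (arr : List Int) (n i : Nat) :
    List (List Int × List Int) × List Int :=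
  let l := 2*i + 1
  let r := 2*i + 2
  let frames := ([l, r].filter (· < n)).map (fun j => (arr, [(i:Int), (j:Int)]))
  let largest := (PySem.List.max? ([i, l, r].filter (· < n)) (fun j => arr.getD j 0)).getD i
  if _h : largest = i then (frames, arr)
  else
    let b := (arr.set i (arr.getD largest 0)).set largest (arr.getD i 0)
    let res := siftB b n largest
    (frames ++ [(b, [(i:Int), (largest:Int)])] ++ res.1, res.2)
termination_by n - i
decreasing_by
  have hm : largest ∈ List.filter (fun x => decide (x < n)) [i, l, r] := by
    simp only [largest] at _h ⊢
    rcases hmax : PySem.List.max? (List.filter (fun x => decide (x < n)) [i, l, r]) (fun j => arr.getD j 0) with _ | m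
    · rw [hmax] at _h; simp at _h
    · simpa using PySem.List.max?_mem hmax
  have h3 : largest = i ∨ largest = l ∨ largest = r := by
    have := (List.mem_filter.mp hm).1; simp only [List.mem_cons, List.not_mem_nil, or_false] at this; exact this
  have hn : largest < n := by
    have := (List.mem_filter.mp hm).2; simpa using this
  simp only [l, r] at h3
  show n - largest < n - i
  omega

def heap_sort_opt_gen_alt (array : List Int) : List (List Int × List Int) :=
  let n := array.length
  let st1 := (List.range (n/2)).reverse.foldl
      (fun (st : List (List Int × List Int) × List Int) i =>
        let res := siftB st.2 n i
        (st.1 ++ res.1, res.2))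
      ([], array)
  let st2 := ((List.range (n-1)).reverse.map (· + 1)).foldl
      (fun (st : List (List Int × List Int) × List Int) i =>
        let a := st.2
        let a' := (a.set 0 (a.getD i 0)).set i (a.getD 0 0)
        let res := siftB a' i 0
        (st.1 ++ [(a', [(0:Int), (i:Int)])] ++ res.1, res.2))
      st1
  st2.1

-- ===== PRECONDITION & SPEC =====
def Spec_heap_sort_opt_gen (array : List Int) (out : List (List Int × List Int)) : Prop := out = heap_sort_opt_gen_alt array
instance (array : List Int) (out : List (List Int × List Int)) : Decidable (Spec_heap_sort_opt_gen array out) := by unfold Spec_heap_sort_opt_gen; infer_instance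

-- ===== CLAIM (what is proved, stated in full; the proofs are below) =====
def Claim_equal_heap_sort_opt_gen : Prop := ∀ (array : List Int), Dom_heap_sort_opt_gen array → Spec_heap_sort_opt_gen array (heap_sort_opt_gen array)

-- ===== LEMMAS AND PROOFS =====

-- the while-loop and the recursive sift agree whenever i < n
theorem heapifyA_eq_siftB : ∀ (k n i : Nat) (arr : List Int)
    (acc : List (List Int × List Int)), n - i ≤ k → i < n →
    heapifyA arr n i acc = (acc ++ (siftB arr n i).1, (siftB arr n i).2) := by
  intro k
  induction k with
  | zero => intro n i arr acc hk hi; omega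
  | succ k ih =>
    intro n i arr acc hk hi
    rw [heapifyA, siftB]
    by_cases hr : 2*i+2 < n
    · have hl : 2*i+1 < n := by omega
      simp only [hl, hr, if_true, List.filter_cons, List.filter_nil, decide_true,
        PySem.List.max?, List.foldl, hi, gt_iff_lt, true_and]
      by_cases h1 : arr.getD i 0 < arr.getD (2*i+1) 0
      · simp only [h1, if_true]
        by_cases h2 : arr.getD (2*i+1) 0 < arr.getD (2*i+2) 0
        · simp only [h2, if_true, Option.getD_some]
          rw [dif_pos (by omega : 2*i+2 ≠ i), dif_neg (by omega : ¬ 2*i+2 = i)]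
          rw [ih n (2*i+2) _ _ (by omega) hr]
          simp [List.append_assoc]
        · simp only [h2, if_false, Option.getD_some]
          rw [dif_pos (by omega : 2*i+1 ≠ i), dif_neg (by omega : ¬ 2*i+1 = i)]
          rw [ih n (2*i+1) _ _ (by omega) hl]
          simp [List.append_assoc]
      · simp only [h1, if_false]
        by_cases h2 : arr.getD i 0 < arr.getD (2*i+2) 0
        · simp only [h2, if_true, Option.getD_some]
          rw [dif_pos (by omega : 2*i+2 ≠ i), dif_neg (by omega : ¬ 2*i+2 = i)]
          rw [ih n (2*i+2) _ _ (by omega) hr]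
          simp [List.append_assoc]
        · simp only [h2, if_false, Option.getD_some]
          simp
    · by_cases hl : 2*i+1 < n
      · simp only [hl, hr, if_true, if_false, List.filter_cons, List.filter_nil, decide_true,
          decide_false, Bool.false_eq_true, PySem.List.max?, List.foldl, hi, gt_iff_lt, true_and, false_and]
        by_cases h1 : arr.getD i 0 < arr.getD (2*i+1) 0
        · simp only [h1, if_true, Option.getD_some]
          rw [dif_pos (by omega : 2*i+1 ≠ i), dif_neg (by omega : ¬ 2*i+1 = i)]
          rw [ih n (2*i+1) _ _ (by omega) hl]
          simp [List.append_assoc]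
        · simp only [h1, if_false, Option.getD_some]
          simp
      · simp only [hl, hr, List.filter_cons, List.filter_nil, decide_true,
          decide_false, Bool.false_eq_true, PySem.List.max?, hi, false_and, if_false]
        simp

-- the build phase, A-step vs B-step
theorem phase1_eq (n : Nat) (is : List Nat) (his : ∀ i ∈ is, i < n)
    (st : List (List Int × List Int) × List Int) :
    is.foldl (fun st (i : Nat) => heapifyA st.2 n i st.1) st
      = is.foldl (fun st (i : Nat) => (st.1 ++ (siftB st.2 n i).1, (siftB st.2 n i).2)) st :=
  PySem.List.foldl_congr_mem _ _ _ _ (fun st i hi =>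
    heapifyA_eq_siftB n n i st.2 st.1 (by omega) (his i hi))

-- the extract phase, A-step vs B-step
theorem phase2_eq (is : List Nat) (his : ∀ i ∈ is, 0 < i)
    (st : List (List Int × List Int) × List Int) :
    is.foldl (fun st (i : Nat) =>
        heapifyA ((st.2.set 0 (st.2.getD i 0)).set i (st.2.getD 0 0)) i 0
          (st.1 ++ [((st.2.set 0 (st.2.getD i 0)).set i (st.2.getD 0 0), [(0:Int), (i:Int)])])) st
      = is.foldl (fun st (i : Nat) =>
          (st.1 ++ [((st.2.set 0 (st.2.getD i 0)).set i (st.2.getD 0 0), [(0:Int), (i:Int)])]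
             ++ (siftB ((st.2.set 0 (st.2.getD i 0)).set i (st.2.getD 0 0)) i 0).1,
           (siftB ((st.2.set 0 (st.2.getD i 0)).set i (st.2.getD 0 0)) i 0).2)) st := by
  refine PySem.List.foldl_congr_mem _ _ _ _ (fun st i hi => ?_)
  rw [heapifyA_eq_siftB i i 0 _ _ (by omega) (his i hi)]

theorem heap_sort_opt_gen_spec : Claim_equal_heap_sort_opt_gen := by
  intro array _
  unfold Spec_heap_sort_opt_gen heap_sort_opt_gen heap_sort_opt_gen_alt
  dsimp only
  rw [phase1_eq array.length _ (fun i hi => by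
        have := List.mem_range.mp (List.mem_reverse.mp hi); omega)]
  rw [phase2_eq _ (fun i hi => by
        rcases List.mem_map.mp hi with ⟨j, _, rfl⟩; omega)]
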